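-- pv_equiv track=rewrite | github.com/dankimjw/PrepSense | backend_gateway/services/recipe_completion_service.py | _are_substitutable
-- ===== SOURCE A (Python) =====
-- def _are_substitutable(ingredient1: str, ingredient2: str) -> bool:
--     """Check if two ingredients are common substitutions"""
--     substitutions = [
--         {"whole milk", "2% milk", "milk", "low fat milk"},
--         {"butter", "margarine"},
--         {"sugar", "honey", "maple syrup"},
--         {"vegetable oil", "canola oil", "olive oil", "cooking oil"},
--     ]
--
--     return any(ingredient1 in group and ingredient2 in group for group in substitutions)
-- ===== SOURCE B (Python) =====
-- _SUBSTITUTION_GROUPS = [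
--     ["whole milk", "2% milk", "milk", "low fat milk"],
--     ["butter", "margarine"],
--     ["sugar", "honey", "maple syrup"],
--     ["vegetable oil", "canola oil", "olive oil", "cooking oil"],
-- ]
--
-- # index built once: ingredient name -> index of its substitution group
-- _GROUP_INDEX = {}
-- for _i, _group in enumerate(_SUBSTITUTION_GROUPS):
--     for _name in _group:
--         _GROUP_INDEX[_name] = _i
--
--
-- def _are_substitutable(ingredient1: str, ingredient2: str) -> bool:
--     """Check if two ingredients are common substitutions"""
--     g1 = _GROUP_INDEX.get(ingredient1)
--     return g1 is not None and g1 == _GROUP_INDEX.get(ingredient2)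
-- ===== Notes on version B (the rewrite author's own statement) =====
-- stated objective: idiomatic
-- what changed: Replaces the per-call scan of all four groups testing both memberships with a module-level name-to-group-index dict built once, so the check is two O(1) lookups and an index comparison (guarded against both names being unknown).
import Mathlib
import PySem

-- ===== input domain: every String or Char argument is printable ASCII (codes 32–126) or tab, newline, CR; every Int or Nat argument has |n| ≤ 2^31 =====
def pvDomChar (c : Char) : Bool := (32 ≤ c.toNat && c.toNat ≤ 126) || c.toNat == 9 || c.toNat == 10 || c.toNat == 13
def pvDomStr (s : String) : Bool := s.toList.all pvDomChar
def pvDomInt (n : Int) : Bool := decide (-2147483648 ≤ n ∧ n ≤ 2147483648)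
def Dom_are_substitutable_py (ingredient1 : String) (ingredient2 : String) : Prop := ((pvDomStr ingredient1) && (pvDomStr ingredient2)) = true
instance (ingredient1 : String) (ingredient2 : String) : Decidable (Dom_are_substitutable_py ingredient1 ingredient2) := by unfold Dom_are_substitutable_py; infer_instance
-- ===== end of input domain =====

-- B replaces A's per-call scan of the four groups by a name→group-index dict built once,
-- answering with two lookups and an index comparison (objective: idiomatic).

-- ===== PORT A =====
def are_substitutable_py (ingredient1 : String) (ingredient2 : String) : Bool :=
  let substitutions : List (PySem.Set String) :=
    [PySem.Set.ofList ["whole milk", "2% milk", "milk", "low fat milk"],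
     PySem.Set.ofList ["butter", "margarine"],
     PySem.Set.ofList ["sugar", "honey", "maple syrup"],
     PySem.Set.ofList ["vegetable oil", "canola oil", "olive oil", "cooking oil"]]
  substitutions.any (fun group =>
    PySem.Set.contains group ingredient1 && PySem.Set.contains group ingredient2)

-- ===== PORT B =====
def pvSubstitutionGroups : List (List String) :=
  [["whole milk", "2% milk", "milk", "low fat milk"],
   ["butter", "margarine"],
   ["sugar", "honey", "maple syrup"],
   ["vegetable oil", "canola oil", "olive oil", "cooking oil"]]

-- the module-level loop of Source B: for i, group in enumerate(...): for name in group: index[name] = i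
def pvGroupIndex : PySem.Dict String Int :=
  (PySem.List.enumerate pvSubstitutionGroups).foldl
    (fun d ig => ig.2.foldl (fun d name => d.insert name ig.1) d)
    PySem.Dict.empty

def are_substitutable_py_alt (ingredient1 : String) (ingredient2 : String) : Bool :=
  match pvGroupIndex.get? ingredient1 with
  | none => false
  | some g1 => pvGroupIndex.get? ingredient2 == some g1

-- ===== PRECONDITION & SPEC =====
def Spec_are_substitutable_py (ingredient1 : String) (ingredient2 : String) (out : Bool) : Prop := out = are_substitutable_py_alt ingredient1 ingredient2
instance (ingredient1 : String) (ingredient2 : String) (out : Bool) : Decidable (Spec_are_substitutable_py ingredient1 ingredient2 out) := by unfold Spec_are_substitutable_py; infer_instance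

-- ===== CLAIM (what is proved, stated in full; the proofs are below) =====
def Claim_equal_are_substitutable_py : Prop := ∀ (ingredient1 : String) (ingredient2 : String), Dom_are_substitutable_py ingredient1 ingredient2 → Spec_are_substitutable_py ingredient1 ingredient2 (are_substitutable_py ingredient1 ingredient2)

-- ===== LEMMAS AND PROOFS =====

def pvAllNames : List String :=
  ["whole milk", "2% milk", "milk", "low fat milk", "butter", "margarine",
   "sugar", "honey", "maple syrup", "vegetable oil", "canola oil", "olive oil", "cooking oil"]

theorem pv_key (i1 i2 : String) :
    are_substitutable_py i1 i2 = are_substitutable_py_alt i1 i2 := by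
  rcases Decidable.em (i1 ∈ pvAllNames) with h1 | h1 <;>
    rcases Decidable.em (i2 ∈ pvAllNames) with h2 | h2 <;>
    simp only [pvAllNames, List.mem_cons, List.not_mem_nil, or_false, not_or] at h1 h2
  · rcases h1 with rfl|rfl|rfl|rfl|rfl|rfl|rfl|rfl|rfl|rfl|rfl|rfl|rfl <;>
      rcases h2 with rfl|rfl|rfl|rfl|rfl|rfl|rfl|rfl|rfl|rfl|rfl|rfl|rfl <;> decide
  · obtain ⟨n1,n2,n3,n4,n5,n6,n7,n8,n9,n10,n11,n12,n13⟩ := h2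
    have m1 : ("whole milk" == i2) = false := beq_eq_false_iff_ne.mpr (Ne.symm n1)
    have m2 : ("2% milk" == i2) = false := beq_eq_false_iff_ne.mpr (Ne.symm n2)
    have m3 : ("milk" == i2) = false := beq_eq_false_iff_ne.mpr (Ne.symm n3)
    have m4 : ("low fat milk" == i2) = false := beq_eq_false_iff_ne.mpr (Ne.symm n4)
    have m5 : ("butter" == i2) = false := beq_eq_false_iff_ne.mpr (Ne.symm n5)
    have m6 : ("margarine" == i2) = false := beq_eq_false_iff_ne.mpr (Ne.symm n6)
    have m7 : ("sugar" == i2) = false := beq_eq_false_iff_ne.mpr (Ne.symm n7)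
    have m8 : ("honey" == i2) = false := beq_eq_false_iff_ne.mpr (Ne.symm n8)
    have m9 : ("maple syrup" == i2) = false := beq_eq_false_iff_ne.mpr (Ne.symm n9)
    have m10 : ("vegetable oil" == i2) = false := beq_eq_false_iff_ne.mpr (Ne.symm n10)
    have m11 : ("canola oil" == i2) = false := beq_eq_false_iff_ne.mpr (Ne.symm n11)
    have m12 : ("olive oil" == i2) = false := beq_eq_false_iff_ne.mpr (Ne.symm n12)
    have m13 : ("cooking oil" == i2) = false := beq_eq_false_iff_ne.mpr (Ne.symm n13)
    rcases h1 with rfl|rfl|rfl|rfl|rfl|rfl|rfl|rfl|rfl|rfl|rfl|rfl|rfl <;>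
      simp [are_substitutable_py, are_substitutable_py_alt, pvGroupIndex, pvSubstitutionGroups,
        PySem.List.enumerate, PySem.Set.ofList, PySem.Set.contains, PySem.Dict.get?,
        PySem.Dict.insert, PySem.Dict.empty, List.find?, n1, n2, n3, n4, n5, n6, n7, n8, n9, n10, n11, n12, n13, m1, m2, m3, m4, m5, m6, m7, m8, m9, m10, m11, m12, m13]
  · obtain ⟨n1,n2,n3,n4,n5,n6,n7,n8,n9,n10,n11,n12,n13⟩ := h1
    have m1 : ("whole milk" == i1) = false := beq_eq_false_iff_ne.mpr (Ne.symm n1)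
    have m2 : ("2% milk" == i1) = false := beq_eq_false_iff_ne.mpr (Ne.symm n2)
    have m3 : ("milk" == i1) = false := beq_eq_false_iff_ne.mpr (Ne.symm n3)
    have m4 : ("low fat milk" == i1) = false := beq_eq_false_iff_ne.mpr (Ne.symm n4)
    have m5 : ("butter" == i1) = false := beq_eq_false_iff_ne.mpr (Ne.symm n5)
    have m6 : ("margarine" == i1) = false := beq_eq_false_iff_ne.mpr (Ne.symm n6)
    have m7 : ("sugar" == i1) = false := beq_eq_false_iff_ne.mpr (Ne.symm n7)
    have m8 : ("honey" == i1) = false := beq_eq_false_iff_ne.mpr (Ne.symm n8)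
    have m9 : ("maple syrup" == i1) = false := beq_eq_false_iff_ne.mpr (Ne.symm n9)
    have m10 : ("vegetable oil" == i1) = false := beq_eq_false_iff_ne.mpr (Ne.symm n10)
    have m11 : ("canola oil" == i1) = false := beq_eq_false_iff_ne.mpr (Ne.symm n11)
    have m12 : ("olive oil" == i1) = false := beq_eq_false_iff_ne.mpr (Ne.symm n12)
    have m13 : ("cooking oil" == i1) = false := beq_eq_false_iff_ne.mpr (Ne.symm n13)
    simp [are_substitutable_py, are_substitutable_py_alt, pvGroupIndex, pvSubstitutionGroups,
      PySem.List.enumerate, PySem.Set.ofList, PySem.Set.contains, PySem.Dict.get?,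
      PySem.Dict.insert, PySem.Dict.empty, List.find?, n1, n2, n3, n4, n5, n6, n7, n8, n9, n10, n11, n12, n13, m1, m2, m3, m4, m5, m6, m7, m8, m9, m10, m11, m12, m13]
  · obtain ⟨n1,n2,n3,n4,n5,n6,n7,n8,n9,n10,n11,n12,n13⟩ := h1
    have m1 : ("whole milk" == i1) = false := beq_eq_false_iff_ne.mpr (Ne.symm n1)
    have m2 : ("2% milk" == i1) = false := beq_eq_false_iff_ne.mpr (Ne.symm n2)
    have m3 : ("milk" == i1) = false := beq_eq_false_iff_ne.mpr (Ne.symm n3)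
    have m4 : ("low fat milk" == i1) = false := beq_eq_false_iff_ne.mpr (Ne.symm n4)
    have m5 : ("butter" == i1) = false := beq_eq_false_iff_ne.mpr (Ne.symm n5)
    have m6 : ("margarine" == i1) = false := beq_eq_false_iff_ne.mpr (Ne.symm n6)
    have m7 : ("sugar" == i1) = false := beq_eq_false_iff_ne.mpr (Ne.symm n7)
    have m8 : ("honey" == i1) = false := beq_eq_false_iff_ne.mpr (Ne.symm n8)
    have m9 : ("maple syrup" == i1) = false := beq_eq_false_iff_ne.mpr (Ne.symm n9)
    have m10 : ("vegetable oil" == i1) = false := beq_eq_false_iff_ne.mpr (Ne.symm n10)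
    have m11 : ("canola oil" == i1) = false := beq_eq_false_iff_ne.mpr (Ne.symm n11)
    have m12 : ("olive oil" == i1) = false := beq_eq_false_iff_ne.mpr (Ne.symm n12)
    have m13 : ("cooking oil" == i1) = false := beq_eq_false_iff_ne.mpr (Ne.symm n13)
    simp [are_substitutable_py, are_substitutable_py_alt, pvGroupIndex, pvSubstitutionGroups,
      PySem.List.enumerate, PySem.Set.ofList, PySem.Set.contains, PySem.Dict.get?,
      PySem.Dict.insert, PySem.Dict.empty, List.find?, n1, n2, n3, n4, n5, n6, n7, n8, n9, n10, n11, n12, n13, m1, m2, m3, m4, m5, m6, m7, m8, m9, m10, m11, m12, m13]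

-- ===== VERDICT (by name: the statement is the Claim_ definition above) =====
theorem are_substitutable_py_spec : Claim_equal_are_substitutable_py := by
  intro i1 i2 _
  unfold Spec_are_substitutable_py
  exact pv_key i1 i2
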